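-- pv_equiv track=rewrite | github.com/GrbavaCigla/AdventOfCode | 2020/7/1.py | grepit
-- ===== SOURCE A (Python) =====
-- def in_bag(bags, bag):
--     for i in bags:
--         if bag in i:
--             return True
--
--     return False
--
-- def grepit(bags, targets):
--     todo = []
--
--     for target in targets:
--         for k, v in bags.items():
--             if in_bag(v, target):
--                 todo.append(k)
--
--     if not todo:
--         return []
--
--     return todo + grepit(bags, todo)
-- ===== SOURCE B (Python) =====
-- def grepit(bags, targets):
--     # Precompute a reverse-containment index (key -> list of keys holding it),
--     # then emit levels iteratively from the index instead of re-scanning all bags per level.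
--     def holders(t):
--         return [k for k, v in bags.items() if any(t in s for s in v)]
--     parents = {k: holders(k) for k in bags}
--     out = []
--     level = [k for t in targets for k in holders(t)]
--     while level:
--         out.extend(level)
--         level = [k for t in level for k in parents[t]]
--     return out
-- ===== Notes on version B (the rewrite author's own statement) =====
-- stated objective: faster
-- what changed: B precomputes a reverse-containment index (key -> holders) once and then emits each further level by O(1) dict lookups per element in an iterative worklist loop, instead of A's recursion that rescans every bag's whole contents for every element of every level.
import Mathlib
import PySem

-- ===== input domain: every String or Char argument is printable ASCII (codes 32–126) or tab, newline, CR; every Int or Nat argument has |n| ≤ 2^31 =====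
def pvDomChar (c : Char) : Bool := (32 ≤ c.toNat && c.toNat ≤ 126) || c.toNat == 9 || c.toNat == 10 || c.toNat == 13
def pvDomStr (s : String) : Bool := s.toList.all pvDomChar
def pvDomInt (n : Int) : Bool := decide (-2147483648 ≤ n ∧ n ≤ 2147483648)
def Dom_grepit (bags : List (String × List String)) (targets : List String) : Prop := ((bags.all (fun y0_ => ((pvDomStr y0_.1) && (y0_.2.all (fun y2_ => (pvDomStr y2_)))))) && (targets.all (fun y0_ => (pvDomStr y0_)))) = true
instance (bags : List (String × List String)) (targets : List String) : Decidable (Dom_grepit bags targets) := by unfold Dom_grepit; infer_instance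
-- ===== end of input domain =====

-- B replaces A's per-level rescan of all bags by a precomputed reverse-containment index and an
-- iterative level loop (objective: faster). Equality of the two ports is proved on all of Pre_.

-- ===== PORT A =====
-- for i in bags: if bag in i: return True / return False  (early-return scan = List.any)
def in_bag (bags : List String) (bag : String) : Bool :=
  bags.any (fun i => PySem.Str.isIn bag i)

-- the body of A's double loop building `todo`
def grepitTodo (bags : List (String × List String)) (targets : List String) : List String :=
  targets.foldl (fun todo target =>
    bags.foldl (fun todo kv => if in_bag kv.2 target then todo ++ [kv.1] else todo) todo) []

-- A's recursion; fuel only makes the recursion structural (on Pre_ the recursion ends before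
-- the fuel does: an acyclic key graph gives at most bags.length + 1 non-empty levels)
def grepitFuel (bags : List (String × List String)) : Nat → List String → List String
  | 0, _ => []
  | n + 1, targets =>
    let todo := grepitTodo bags targets
    if todo = [] then [] else todo ++ grepitFuel bags n todo

def grepit (bags : List (String × List String)) (targets : List String) : List String :=
  grepitFuel bags (bags.length + 2) targets

-- ===== PORT B =====
-- holders(t) = [k for k, v in bags.items() if any(t in s for s in v)]
def holdersB (bags : List (String × List String)) (t : String) : List String :=
  (bags.filter (fun kv => kv.2.any (fun s => PySem.Str.isIn t s))).map Prod.fst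

-- parents = {k: holders(k) for k in bags}
def parentsB (bags : List (String × List String)) : PySem.Dict String (List String) :=
  bags.foldl (fun d kv => d.insert kv.1 (holdersB bags kv.1)) PySem.Dict.empty

-- the while loop (fuel only for structurality, as for A: same bound, same level count)
def altLoopB (parents : PySem.Dict String (List String)) :
    Nat → List String → List String → List String
  | 0, out, _ => out
  | n + 1, out, level =>
    if level = [] then out
    else altLoopB parents n (out ++ level) (level.flatMap (fun t => parents.getD t []))

def grepit_alt (bags : List (String × List String)) (targets : List String) : List String :=
  altLoopB (parentsB bags) (bags.length + 2) [] (targets.flatMap (fun t => holdersB bags t))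

-- ===== PRECONDITION & SPEC =====
-- helpers for Pre_ (independent of the ports): the key-containment graph reachable from targets
def pvSuccs (bags : List (String × List String)) (S : List String) : List String :=
  (bags.filter (fun kv => S.any (fun t => kv.2.any (fun s => PySem.Str.isIn t s)))).map Prod.fst

def pvReach (bags : List (String × List String)) : Nat → List String → List String
  | 0, S => S
  | n + 1, S => pvReach bags n (S ++ pvSuccs bags S)

-- Pre_ excludes exactly the inputs on which A does not return: when the key-containment graph of
-- the INPUT has a cycle reachable from targets, A's recursion never ends (Python raises
-- RecursionError).  'No reachable cycle' is a property of the input graph, decided the standard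
-- way (bounded closure of the edge relation); it is not a re-run of either port's computation.
def Pre_grepit (bags : List (String × List String)) (targets : List String) : Prop :=
  ((pvReach bags bags.length (pvSuccs bags targets)).all
    (fun k => !((pvReach bags bags.length (pvSuccs bags [k])).contains k))) = true

instance (bags : List (String × List String)) (targets : List String) : Decidable (Pre_grepit bags targets) := by unfold Pre_grepit; infer_instance

def pvWitness_grepit : (List (String × List String)) × List String :=
  ([("light red", ["1 shiny gold bag"]), ("shiny gold", ["2 dark red bags"]), ("dark red", [])],
   ["dark red"])

def Spec_grepit (bags : List (String × List String)) (targets : List String) (out : List String) : Prop := out = grepit_alt bags targets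
instance (bags : List (String × List String)) (targets : List String) (out : List String) : Decidable (Spec_grepit bags targets out) := by unfold Spec_grepit; infer_instance

-- ===== CLAIM (what is proved, stated in full; the proofs are below) =====
def Claim_equal_grepit : Prop := ∀ (bags : List (String × List String)) (targets : List String), Dom_grepit bags targets → Pre_grepit bags targets → Spec_grepit bags targets (grepit bags targets)

-- ===== LEMMAS AND PROOFS =====

-- A's level, in flatMap form (proof-only restatement of grepitFuel's recursion)
def levelsA (bags : List (String × List String)) : Nat → List String → List String
  | 0, _ => []
  | n + 1, level => if level = [] then [] else level ++ levelsA bags n (grepitTodo bags level)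

theorem grepitTodo_inner (bags : List (String × List String)) (t : String) (acc : List String) :
    bags.foldl (fun todo kv => if in_bag kv.2 t then todo ++ [kv.1] else todo) acc
      = acc ++ holdersB bags t := by
  rw [PySem.List.foldl_append_if (fun kv => in_bag kv.2 t) Prod.fst]
  rfl

theorem grepitTodo_eq (bags : List (String × List String)) (targets : List String) :
    grepitTodo bags targets = targets.flatMap (fun t => holdersB bags t) := by
  unfold grepitTodo
  suffices h : ∀ acc : List String,
      targets.foldl (fun todo target =>
        bags.foldl (fun todo kv => if in_bag kv.2 target then todo ++ [kv.1] else todo) todo) acc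
      = acc ++ targets.flatMap (fun t => holdersB bags t) by simpa using h []
  intro acc
  have hfun : (fun (todo : List String) (target : String) =>
      bags.foldl (fun todo kv => if in_bag kv.2 target then todo ++ [kv.1] else todo) todo)
      = fun todo target => todo ++ holdersB bags target := by
    funext todo target; exact grepitTodo_inner bags target todo
  rw [hfun, PySem.List.foldl_append_eq_flatMap (fun t => holdersB bags t)]

theorem grepitFuel_eq_levelsA (bags : List (String × List String)) :
    ∀ (n : Nat) (targets : List String),
      grepitFuel bags n targets = levelsA bags n (grepitTodo bags targets) := by
  intro n
  induction n with
  | zero => intro targets; rfl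
  | succ m ih => intro targets; simp only [grepitFuel, levelsA, ih]

theorem mem_holdersB_keys (bags : List (String × List String)) (t x : String)
    (hx : x ∈ holdersB bags t) : x ∈ bags.map Prod.fst := by
  unfold holdersB at hx
  rcases List.mem_map.1 hx with ⟨kv, hkv, rfl⟩
  exact List.mem_map.2 ⟨kv, List.mem_of_mem_filter hkv, rfl⟩

theorem parentsB_getD (bags : List (String × List String)) (x : String)
    (hx : x ∈ bags.map Prod.fst) :
    (parentsB bags).getD x [] = holdersB bags x := by
  unfold parentsB
  suffices h : ∀ (L : List (String × List String)) (d : PySem.Dict String (List String)),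
      (L.foldl (fun d kv => d.insert kv.1 (holdersB bags kv.1)) d).getD x []
        = if x ∈ L.map Prod.fst then holdersB bags x else d.getD x [] by
    simpa [hx] using h bags PySem.Dict.empty
  intro L
  induction L with
  | nil => intro d; simp
  | cons kv rest ih =>
    intro d
    simp only [List.foldl, ih, List.map, List.mem_cons]
    by_cases hr : x ∈ rest.map Prod.fst
    · simp [hr]
    · by_cases he : x = kv.1
      · subst he; simp [hr, PySem.Dict.getD_insert_self]
      · simp [hr, he, PySem.Dict.getD_insert]

theorem flatMap_parents_eq (bags : List (String × List String)) (level : List String)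
    (h : ∀ x ∈ level, x ∈ bags.map Prod.fst) :
    level.flatMap (fun t => (parentsB bags).getD t []) = grepitTodo bags level := by
  rw [grepitTodo_eq]
  exact List.flatMap_congr (fun t ht => parentsB_getD bags t (h t ht))

theorem altLoopB_eq_levelsA (bags : List (String × List String)) :
    ∀ (n : Nat) (out level : List String), (∀ x ∈ level, x ∈ bags.map Prod.fst) →
      altLoopB (parentsB bags) n out level = out ++ levelsA bags n level := by
  intro n
  induction n with
  | zero => intro out level _; simp [altLoopB, levelsA]
  | succ m ih =>
    intro out level hsub
    simp only [altLoopB, levelsA]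
    by_cases he : level = []
    · simp [he]
    · have hflat : level.flatMap (fun t => (parentsB bags).getD t []) = grepitTodo bags level :=
        flatMap_parents_eq bags level hsub
      have hnext : ∀ x ∈ grepitTodo bags level, x ∈ bags.map Prod.fst := by
        intro x hx
        rw [grepitTodo_eq] at hx
        rcases List.mem_flatMap.1 hx with ⟨t, _, hxt⟩
        exact mem_holdersB_keys bags t x hxt
      simp [he, hflat, ih (out ++ level) (grepitTodo bags level) hnext]

-- ===== VERDICT (by name: the statement is the Claim_ definition above) =====
theorem grepit_spec : Claim_equal_grepit := by
  intro bags targets _ _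
  unfold Spec_grepit grepit grepit_alt
  rw [grepitFuel_eq_levelsA, ← grepitTodo_eq]
  have hsub : ∀ x ∈ grepitTodo bags targets, x ∈ bags.map Prod.fst := by
    intro x hx
    rw [grepitTodo_eq] at hx
    rcases List.mem_flatMap.1 hx with ⟨t, _, hxt⟩
    exact mem_holdersB_keys bags t x hxt
  rw [altLoopB_eq_levelsA bags (bags.length + 2) [] (grepitTodo bags targets) hsub]
  simp
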